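-- pv_equiv track=rewrite | github.com/ants-xjtu/REAL-artifact-evaluation | scripts/utils/aspath_seg.py | colors_for_path
-- ===== SOURCE A (Python) =====
-- from typing import Dict, List, Tuple, Optional
--
-- def colors_for_path(
--     as_path: List[int], as_to_node: Dict[int, int], blocks: List[List[int]]
-- ) -> Tuple[List[str], List[str], int]:
--     """Return (raw_colors, minimized_colors, min_segments)."""
--     color_of_node: Dict[int, int] = {}
--     for ci, group in enumerate(blocks):
--         for nid in group:
--             color_of_node[nid] = ci
--     wildcard_color_index = len(blocks) - 1 if blocks else -1
--
--     raw_colors: List[str] = []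
--     marks: List[str] = []  # 'W' for wildcard, 'U<asn>' for unknown, or 'Ck'
--
--     for asn in as_path:
--         nid = as_to_node.get(asn)
--         if nid is None:
--             c = f"U{asn}"
--             raw_colors.append(c)
--             marks.append(c)
--             continue
--         ci = color_of_node.get(nid)
--         if ci is None:
--             c = f"U{asn}"
--             raw_colors.append(c)
--             marks.append(c)
--             continue
--         if ci == wildcard_color_index:
--             raw_colors.append(f"W({asn})")
--             marks.append("W")
--         else:
--             raw_colors.append(f"C{ci}")
--             marks.append(f"C{ci}")
--
--     filled = marks[:]
--     n = len(filled)
--     i = 0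
--     while i < n:
--         if filled[i] != "W":
--             i += 1
--             continue
--         j = i
--         while j < n and filled[j] == "W":
--             j += 1
--         left = filled[i - 1] if i - 1 >= 0 and filled[i - 1] != "W" else None
--         right = filled[j] if j < n and filled[j] != "W" else None
--         if left is not None:
--             fill = left
--         elif right is not None:
--             fill = right
--         else:
--             fill = "C*"
--         for k in range(i, j):
--             filled[k] = fill
--         i = j
--
--     segments = 0
--     prev = None
--     minimized_labels: List[str] = []
--     for lab in filled:
--         if lab != prev:
--             segments += 1
--             prev = lab
--         minimized_labels.append(lab)
--
--     return raw_colors, minimized_labels, segments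
-- ===== SOURCE B (Python) =====
-- from typing import Dict, List, Tuple
--
-- def _forward(marks: List[str]) -> List[str]:
--     """Forward sweep: replace each 'W' with the last non-'W' label seen (leading 'W's stay)."""
--     out: List[str] = []
--     last = None
--     for m in marks:
--         if m != "W":
--             last = m
--             out.append(m)
--         else:
--             out.append(last if last is not None else "W")
--     return out
--
-- def _backward_fill(labels: List[str]) -> List[str]:
--     """Backward sweep: fill remaining 'W's with the next non-'W' label, or 'C*' if none."""
--     out: List[str] = []
--     nxt = None
--     for lab in reversed(labels):
--         if lab != "W":
--             nxt = lab
--             out.append(lab)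
--         else:
--             out.append(nxt if nxt is not None else "C*")
--     out.reverse()
--     return out
--
-- def colors_for_path(
--     as_path: List[int], as_to_node: Dict[int, int], blocks: List[List[int]]
-- ) -> Tuple[List[str], List[str], int]:
--     """Return (raw_colors, minimized_colors, min_segments)."""
--     color_of_node = {nid: ci for ci, group in enumerate(blocks) for nid in group}
--     wildcard_color_index = len(blocks) - 1 if blocks else -1
--
--     raw_colors: List[str] = []
--     marks: List[str] = []
--     for asn in as_path:
--         nid = as_to_node.get(asn)
--         ci = color_of_node.get(nid) if nid is not None else None
--         if ci is None:
--             raw_colors.append(f"U{asn}")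
--             marks.append(f"U{asn}")
--         elif ci == wildcard_color_index:
--             raw_colors.append(f"W({asn})")
--             marks.append("W")
--         else:
--             raw_colors.append(f"C{ci}")
--             marks.append(f"C{ci}")
--
--     filled = _backward_fill(_forward(marks))
--
--     if not filled:
--         segments = 0
--     else:
--         segments = 1 + sum(a != b for a, b in zip(filled, filled[1:]))
--
--     return raw_colors, filled, segments
-- ===== Notes on version B (the rewrite author's own statement) =====
-- stated objective: alternative
-- what changed: The explicit index-based run scanner (find each maximal 'W' run, inspect both neighbours, overwrite the run in place) is replaced by two linear directional sweeps: a forward sweep propagating the last non-'W' label into 'W' slots, then a backward sweep filling the remaining leading 'W' block from the right (or 'C*' if the whole path is wildcard); the segment count becomes a zip-with-successor comparison instead of a prev-tracking fold.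
import Mathlib
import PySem

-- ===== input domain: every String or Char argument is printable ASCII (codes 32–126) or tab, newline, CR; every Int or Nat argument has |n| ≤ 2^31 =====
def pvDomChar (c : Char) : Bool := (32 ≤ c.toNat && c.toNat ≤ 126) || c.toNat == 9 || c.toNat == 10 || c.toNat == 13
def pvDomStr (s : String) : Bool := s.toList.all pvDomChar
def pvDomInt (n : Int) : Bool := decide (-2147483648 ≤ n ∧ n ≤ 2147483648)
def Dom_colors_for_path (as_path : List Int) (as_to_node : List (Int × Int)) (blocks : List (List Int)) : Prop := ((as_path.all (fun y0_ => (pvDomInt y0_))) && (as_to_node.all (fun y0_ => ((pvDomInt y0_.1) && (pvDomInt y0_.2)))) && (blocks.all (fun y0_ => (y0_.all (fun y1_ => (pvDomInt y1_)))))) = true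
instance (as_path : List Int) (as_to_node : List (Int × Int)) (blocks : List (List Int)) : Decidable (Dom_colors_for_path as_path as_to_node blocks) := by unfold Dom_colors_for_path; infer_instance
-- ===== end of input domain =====

-- B replaces A's explicit index-based wildcard-run scanner by two directional sweeps (forward
-- label propagation, then a backward fill of the leading wildcard block); same asymptotic cost
-- ('alternative' objective, not claimed faster).

-- ===== PORT A =====

-- shared lookup for the dict-typed PARAMETER (Python d.get(k): first match in the assoc list)
def pyDictGet? (d : List (Int × Int)) (k : Int) : Option Int :=
  (d.find? (fun p => p.1 == k)).map (·.2)

-- inner while of A: 'while j < n and filled[j] == "W": j += 1' (indices always in range, so getD is exact)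
def scanJ (filled : List String) (n j : Nat) : Nat :=
  if h : j < n ∧ filled.getD j "" = "W" then scanJ filled (n := n) (j + 1) else j
termination_by n - j
decreasing_by obtain ⟨h1, -⟩ := h; omega

theorem scanJ_ge (filled : List String) (n : Nat) : ∀ j, j ≤ scanJ filled n j := by
  have main : ∀ d j, n - j ≤ d → j ≤ scanJ filled n j := by
    intro d
    induction d with
    | zero =>
      intro j hj
      rw [scanJ]
      split
      · next h => omega
      · exact le_refl j
    | succ d ih =>
      intro j hj
      rw [scanJ]
      split
      · next h => exact le_trans (Nat.le_succ j) (ih (j + 1) (by omega))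
      · exact le_refl j
  intro j
  exact main (n - j) j le_rfl

theorem scanJ_gt (filled : List String) (n i : Nat) (h1 : i < n)
    (h2 : filled.getD i "" = "W") : i < scanJ filled n i := by
  rw [scanJ, dif_pos ⟨h1, h2⟩]
  exact lt_of_lt_of_le (Nat.lt_succ_self i) (scanJ_ge filled n (i + 1))

-- 'for k in range(i, j): filled[k] = fill'
def setRange (filled : List String) (i j : Nat) (v : String) : List String :=
  (PySem.List.pyRange (i : Int) (j : Int) 1).foldl (fun acc k => acc.set k.toNat v) filled

-- A's wildcard-run fill loop ('while i < n: …'), on the copied marks list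
def fillLoop (filled : List String) (n i : Nat) : List String :=
  if hi : i < n then
    if hw : filled.getD i "" ≠ "W" then
      fillLoop filled n (i + 1)
    else
      let j := scanJ filled n i
      let left : Option String :=
        if 1 ≤ i ∧ filled.getD (i - 1) "" ≠ "W" then some (filled.getD (i - 1) "") else none
      let right : Option String :=
        if j < n ∧ filled.getD j "" ≠ "W" then some (filled.getD j "") else none
      let fill : String :=
        match left with
        | some l => l
        | none => match right with
          | some r => r
          | none => "C*"
      fillLoop (setRange filled i j fill) n j
    else filled
termination_by n - i
decreasing_by
  · omega
  · have := scanJ_gt filled n i hi (by simpa using hw)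
    omega

-- loop body of A's raw/marks pass (one iteration of 'for asn in as_path', with its two
-- early-continue unknown branches)
def colorStep (color_of_node : PySem.Dict Int Int) (wildcard_color_index : Int)
    (as_to_node : List (Int × Int)) (acc : List String × List String) (asn : Int) :
    List String × List String :=
  match pyDictGet? as_to_node asn with
  | none => (acc.1 ++ ["U" ++ PySem.Int.toStr asn], acc.2 ++ ["U" ++ PySem.Int.toStr asn])
  | some nid =>
    match color_of_node.get? nid with
    | none => (acc.1 ++ ["U" ++ PySem.Int.toStr asn], acc.2 ++ ["U" ++ PySem.Int.toStr asn])
    | some ci =>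
      if ci = wildcard_color_index then
        (acc.1 ++ ["W(" ++ PySem.Int.toStr asn ++ ")"], acc.2 ++ ["W"])
      else
        (acc.1 ++ ["C" ++ PySem.Int.toStr ci], acc.2 ++ ["C" ++ PySem.Int.toStr ci])

def colors_for_path (as_path : List Int) (as_to_node : List (Int × Int)) (blocks : List (List Int)) : List String × List String × Int :=
  let color_of_node : PySem.Dict Int Int :=
    (PySem.List.enumerate blocks).foldl
      (fun d p => p.2.foldl (fun d nid => d.insert nid p.1) d) PySem.Dict.empty
  let wildcard_color_index : Int := if blocks ≠ [] then (blocks.length : Int) - 1 else -1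
  let rm : List String × List String :=
    as_path.foldl (colorStep color_of_node wildcard_color_index as_to_node) ([], [])
  let filled : List String := fillLoop rm.2 rm.2.length 0
  let smm : Int × Option String × List String :=
    filled.foldl (fun acc lab =>
      if some lab ≠ acc.2.1 then (acc.1 + 1, some lab, acc.2.2 ++ [lab])
      else (acc.1, acc.2.1, acc.2.2 ++ [lab])) (0, none, [])
  (rm.1, smm.2.2, smm.1)

-- ===== PORT B =====

-- forward sweep: each 'W' takes the last non-'W' label seen (leading 'W's stay 'W')
def fwdSweep : Option String → List String → List String
  | _, [] => []
  | last, m :: ms =>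
    if m ≠ "W" then m :: fwdSweep (some m) ms
    else (last.getD "W") :: fwdSweep last ms

-- backward sweep core (run over the reversed list): remaining 'W's take nxt, or 'C*'
def bwdCore : Option String → List String → List String
  | _, [] => []
  | nxt, l :: ls =>
    if l ≠ "W" then l :: bwdCore (some l) ls
    else (nxt.getD "C*") :: bwdCore nxt ls

-- loop body of B's raw/marks pass (single combined optional-colour lookup, then one match)
def colorStepAlt (color_of_node : PySem.Dict Int Int) (wildcard_color_index : Int)
    (as_to_node : List (Int × Int)) (acc : List String × List String) (asn : Int) :
    List String × List String :=
  let ci : Option Int :=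
    match pyDictGet? as_to_node asn with
    | none => none
    | some nid => color_of_node.get? nid
  match ci with
  | none => (acc.1 ++ ["U" ++ PySem.Int.toStr asn], acc.2 ++ ["U" ++ PySem.Int.toStr asn])
  | some ci =>
    if ci = wildcard_color_index then
      (acc.1 ++ ["W(" ++ PySem.Int.toStr asn ++ ")"], acc.2 ++ ["W"])
    else
      (acc.1 ++ ["C" ++ PySem.Int.toStr ci], acc.2 ++ ["C" ++ PySem.Int.toStr ci])

def colors_for_path_alt (as_path : List Int) (as_to_node : List (Int × Int)) (blocks : List (List Int)) : List String × List String × Int :=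
  let color_of_node : PySem.Dict Int Int :=
    (PySem.List.enumerate blocks).foldl
      (fun d p => p.2.foldl (fun d nid => d.insert nid p.1) d) PySem.Dict.empty
  let wildcard_color_index : Int := if blocks ≠ [] then (blocks.length : Int) - 1 else -1
  let rm : List String × List String :=
    as_path.foldl (colorStepAlt color_of_node wildcard_color_index as_to_node) ([], [])
  let filled : List String := (bwdCore none (fwdSweep none rm.2).reverse).reverse
  let segments : Int :=
    if filled = [] then 0
    else 1 + ((filled.zip filled.tail).countP (fun p => p.1 != p.2) : Int)
  (rm.1, filled, segments)

-- ===== PRECONDITION & SPEC =====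
def Spec_colors_for_path (as_path : List Int) (as_to_node : List (Int × Int)) (blocks : List (List Int)) (out : List String × List String × Int) : Prop := out = colors_for_path_alt as_path as_to_node blocks
instance (as_path : List Int) (as_to_node : List (Int × Int)) (blocks : List (List Int)) (out : List String × List String × Int) : Decidable (Spec_colors_for_path as_path as_to_node blocks out) := by unfold Spec_colors_for_path; infer_instance

-- ===== CLAIM (what is proved, stated in full; the proofs are below) =====
def Claim_equal_colors_for_path : Prop := ∀ (as_path : List Int) (as_to_node : List (Int × Int)) (blocks : List (List Int)), Dom_colors_for_path as_path as_to_node blocks → Spec_colors_for_path as_path as_to_node blocks (colors_for_path as_path as_to_node blocks)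


-- ===== LEMMAS AND PROOFS =====

-- structural specification of A's run fill: 'left' carries the last already-filled label
def fillS : Option String → List String → List String
  | _, [] => []
  | left, m :: ms =>
    if m = "W" then
      let rest := ms.dropWhile (· == "W")
      let fill : String :=
        match left with
        | some l => l
        | none => match rest.head? with
          | some r => r
          | none => "C*"
      fill :: (List.replicate (ms.takeWhile (· == "W")).length fill ++ fillS (some fill) rest)
    else m :: fillS (some m) ms
termination_by _ l => l.length
decreasing_by
  · have := List.length_dropWhile_le (p := (· == "W")) (l := ms)
    simp; omega
  · simp

theorem getLast?_or_cons {α : Type} (l : α) (ls : List α) (p0 : Option α) :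
    (l :: ls).getLast?.or p0 = ls.getLast?.or (some l) := by
  cases ls with
  | nil => simp
  | cons m ms =>
    rw [List.getLast?_cons_cons, List.getLast?_eq_some_getLast (l := m :: ms) (by simp)]
    simp

-- change count of A's final loop, as a function of the previous label
def chg : Option String → List String → Int
  | _, [] => 0
  | p, l :: ls => (if some l ≠ p then 1 else 0) + chg (some l) ls

theorem segfold_eq (ls : List String) :
    ∀ (s0 : Int) (p0 : Option String) (a0 : List String),
    ls.foldl (fun acc lab =>
      if some lab ≠ acc.2.1 then (acc.1 + 1, some lab, acc.2.2 ++ [lab])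
      else (acc.1, acc.2.1, acc.2.2 ++ [lab])) (s0, p0, a0)
      = (s0 + chg p0 ls, ls.getLast?.or p0, a0 ++ ls) := by
  induction ls with
  | nil => intro s0 p0 a0; simp [chg]
  | cons l ls ih =>
    intro s0 p0 a0
    rw [List.foldl_cons]
    dsimp only
    rw [getLast?_or_cons]
    by_cases h : some l ≠ p0
    · rw [if_pos h, ih, chg, if_pos h]
      refine Prod.ext ?_ (Prod.ext rfl ?_)
      · simp; omega
      · simp
    · rw [not_not] at h
      rw [if_neg (by simp [h]), ih, chg, if_neg (by simp [h]), h]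
      simp
  
theorem chg_some_eq (xs : List String) : ∀ (x : String),
    chg (some x) xs = (((x :: xs).zip xs).countP (fun p => p.1 != p.2) : Int) := by
  induction xs with
  | nil => intro x; simp [chg]
  | cons y ys ih =>
    intro x
    rw [List.zip_cons_cons, List.countP_cons, chg, ih y]
    by_cases h : y = x
    · simp [h]
    · rw [if_pos (by simp [h]), if_pos (by simp [Ne.symm h])]
      push_cast
      ring

theorem chg_none_eq (ls : List String) :
    chg none ls = if ls = [] then 0
      else 1 + ((ls.zip ls.tail).countP (fun p => p.1 != p.2) : Int) := by
  cases ls with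
  | nil => simp [chg]
  | cons x xs =>
    rw [chg, if_pos (by simp), chg_some_eq]
    simp

theorem dropWhile_head_ne (ms : List String) : ∀ (r : String) (rs : List String),
    ms.dropWhile (· == "W") = r :: rs → r ≠ "W" := by
  induction ms with
  | nil => intro r rs h; simp [List.dropWhile] at h
  | cons m ms ih =>
    intro r rs h
    by_cases hm : m = "W"
    · rw [List.dropWhile_cons_of_pos (by simp [hm])] at h
      exact ih r rs h
    · rw [List.dropWhile_cons_of_neg (by simp [hm])] at h
      injection h with h1 h2
      rw [← h1]
      exact hm

theorem scanJ_eq : ∀ (d : Nat) (L : List String) (j : Nat), L.length - j ≤ d → j ≤ L.length →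
    scanJ L L.length j = j + ((L.drop j).takeWhile (· == "W")).length := by
  intro d
  induction d with
  | zero =>
    intro L j hd hle
    have hj : j = L.length := by omega
    rw [scanJ, dif_neg (by intro hc; omega)]
    rw [List.drop_eq_nil_of_le (by omega)]
    simp
  | succ d ih =>
    intro L j hd hle
    rw [scanJ]
    by_cases h1 : j < L.length
    · by_cases h2 : L.getD j "" = "W"
      · rw [dif_pos ⟨h1, h2⟩, ih L (j + 1) (by omega) (by omega)]
        have hW : L[j] = "W" := by rw [← List.getD_eq_getElem L "" h1]; exact h2
        rw [List.drop_eq_getElem_cons h1, List.takeWhile_cons_of_pos (by simp [hW])]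
        simp
        try omega
      · rw [dif_neg (by intro hc; exact h2 hc.2)]
        have hW : ¬ L[j] = "W" := by rw [← List.getD_eq_getElem L "" h1]; exact h2
        rw [List.drop_eq_getElem_cons h1, List.takeWhile_cons_of_neg (by simp [hW])]
        simp
    · rw [dif_neg (by intro hc; exact h1 hc.1)]
      rw [List.drop_eq_nil_of_le (by omega)]
      simp

theorem setRange_cons (L : List String) (i j : Nat) (v : String) (h : i < j) :
    setRange L i j v = setRange (L.set i v) (i + 1) j v := by
  rw [setRange, setRange, PySem.List.pyRange_one_cons (by exact_mod_cast h), List.foldl_cons]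
  have h1 : ((i : Int)).toNat = i := Int.toNat_natCast i
  rw [h1]
  congr 2

theorem setRange_eq : ∀ (d i : Nat) (L : List String) (j : Nat) (v : String),
    j - i ≤ d → i ≤ j → j ≤ L.length →
    setRange L i j v = L.take i ++ (List.replicate (j - i) v ++ L.drop j) := by
  intro d
  induction d with
  | zero =>
    intro i L j v hd hij hle
    have hij' : i = j := by omega
    subst hij'
    rw [setRange, PySem.List.pyRange_one_eq_nil (by omega)]
    simp
  | succ d ih =>
    intro i L j v hd hij hle
    by_cases h : i < j
    · rw [setRange_cons L i j v h,
        ih (i + 1) (L.set i v) j v (by omega) (by omega) (by simpa using hle)]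
      have hset : L.set i v = L.take i ++ v :: L.drop (i + 1) := by
        rw [List.set_eq_take_append_cons_drop, if_pos (by omega)]
      have hlenti : (L.take i).length = i := by rw [List.length_take]; omega
      have htake : (L.set i v).take (i + 1) = L.take i ++ [v] := by
        rw [hset, List.take_append, List.take_of_length_le (by rw [hlenti]; omega)]
        have h1 : i + 1 - (L.take i).length = 1 := by rw [hlenti]; omega
        rw [h1, List.take_succ_cons, List.take_zero]
      have hdrop : (L.set i v).drop j = L.drop j := by
        rw [List.drop_set, if_pos h]
      rw [htake, hdrop]
      have hrepl : j - i = (j - (i + 1)) + 1 := by omega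
      rw [hrepl, List.replicate_succ]
      simp
    · have hij' : i = j := by omega
      subst hij'
      rw [setRange, PySem.List.pyRange_one_eq_nil (by omega)]
      simp

theorem dropWhile_eq_drop_len_takeWhile (p : String → Bool) (l : List String) :
    l.dropWhile p = l.drop (l.takeWhile p).length :=
  calc l.dropWhile p
      = List.drop (l.takeWhile p).length (l.takeWhile p ++ l.dropWhile p) :=
        (List.drop_left' rfl).symm
    _ = l.drop (l.takeWhile p).length := by rw [List.takeWhile_append_dropWhile]

theorem fill_step (d : Nat)
    (ih : ∀ (L : List String) (i : Nat), L.length - i ≤ d → i ≤ L.length →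
      (∀ k, k < i → L.getD k "" ≠ "W") →
      fillLoop L L.length i =
        L.take i ++ fillS (if i = 0 then none else some (L.getD (i - 1) "")) (L.drop i))
    (L : List String) (i tl : Nat) (fv : String)
    (hd : L.length - i ≤ d + 1) (hi : i < L.length)
    (hinv : ∀ k, k < i → L.getD k "" ≠ "W")
    (hfne : fv ≠ "W")
    (hjle : i + (tl + 1) ≤ L.length) :
    fillLoop (setRange L i (i + (tl + 1)) fv) L.length (i + (tl + 1))
      = L.take i ++ (List.replicate (tl + 1) fv ++ fillS (some fv) (L.drop (i + (tl + 1)))) := by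
  rw [setRange_eq (tl + 1) i L (i + (tl + 1)) fv (by omega) (by omega) hjle]
  have hji : i + (tl + 1) - i = tl + 1 := by omega
  rw [hji]
  set L' := L.take i ++ (List.replicate (tl + 1) fv ++ L.drop (i + (tl + 1))) with hL'
  have hti : (L.take i).length = i := by rw [List.length_take]; omega
  have hlen' : L'.length = L.length := by
    rw [hL']; simp; omega
  rw [← hlen']
  have hinv'' : ∀ k, k < i + (tl + 1) → L'.getD k "" ≠ "W" := by
    intro k hk
    rw [List.getD_eq_getElem?_getD, hL']
    by_cases hki : k < i
    · rw [List.getElem?_append_left (by rw [hti]; omega), List.getElem?_take, if_pos hki,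
        ← List.getD_eq_getElem?_getD]
      exact hinv k hki
    · rw [List.getElem?_append_right (by rw [hti]; omega), List.getElem?_append_left
        (by rw [hti, List.length_replicate]; omega), List.getElem?_replicate,
        if_pos (by rw [hti]; omega)]
      simpa using hfne
  rw [ih L' (i + (tl + 1)) (by rw [hlen']; omega) (by rw [hlen']; omega) hinv'']
  rw [if_neg (show ¬ i + (tl + 1) = 0 by omega)]
  have hgd : L'.getD (i + (tl + 1) - 1) "" = fv := by
    rw [List.getD_eq_getElem?_getD, hL', List.getElem?_append_right (by rw [hti]; omega),
      List.getElem?_append_left (by rw [hti, List.length_replicate]; omega),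
      List.getElem?_replicate, if_pos (by rw [hti]; omega)]
    simp
  have htk : L'.take (i + (tl + 1)) = L.take i ++ List.replicate (tl + 1) fv := by
    rw [hL', ← List.append_assoc]
    exact List.take_left' (by rw [List.length_append, hti, List.length_replicate])
  have hdp : L'.drop (i + (tl + 1)) = L.drop (i + (tl + 1)) := by
    rw [hL', ← List.append_assoc]
    exact List.drop_left' (by rw [List.length_append, hti, List.length_replicate])
  rw [hgd, htk, hdp]
  simp

theorem fillLoop_eq_fillS_aux : ∀ (d : Nat) (L : List String) (i : Nat),
    L.length - i ≤ d → i ≤ L.length → (∀ k, k < i → L.getD k "" ≠ "W") →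
    fillLoop L L.length i =
      L.take i ++ fillS (if i = 0 then none else some (L.getD (i - 1) "")) (L.drop i) := by
  intro d
  induction d with
  | zero =>
    intro L i hd hle hinv
    have hi : i = L.length := by omega
    rw [fillLoop, dif_neg (by omega)]
    rw [hi, List.drop_length, List.take_length]
    simp [fillS]
  | succ d ih =>
    intro L i hd hle hinv
    rw [fillLoop]
    by_cases hi : i < L.length
    · rw [dif_pos hi]
      by_cases hw : L.getD i "" ≠ "W"
      · have hinv' : ∀ k, k < i + 1 → L.getD k "" ≠ "W" := by
          intro k hk
          by_cases hki : k < i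
          · exact hinv k hki
          · have : k = i := by omega
            rw [this]; exact hw
        have hgi : L.getD i "" = L[i] := List.getD_eq_getElem L "" hi
        have hrhs : L.take i ++ fillS (if i = 0 then none else some (L.getD (i - 1) "")) (L.drop i)
            = L.take (i + 1) ++ fillS (if i + 1 = 0 then none else some (L.getD (i + 1 - 1) "")) (L.drop (i + 1)) := by
          rw [List.drop_eq_getElem_cons hi]
          rw [fillS, if_neg (by rw [← hgi]; exact hw)]
          rw [if_neg (show ¬(i + 1 = 0) by omega)]
          have h10 : i + 1 - 1 = i := by omega
          rw [h10, hgi, List.take_add_one, List.getElem?_eq_getElem hi]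
          simp only [Option.toList_some, List.append_assoc, List.singleton_append]
        rw [dif_pos hw, ih L (i + 1) (by omega) (by omega) hinv']
        exact hrhs.symm
      · have hWi : L.getD i "" = "W" := not_not.mp hw
        rw [dif_neg hw]
        have hgetI : L[i] = "W" := by rw [← List.getD_eq_getElem L "" hi]; exact hWi
        have hdropi : L.drop i = "W" :: L.drop (i + 1) := by
          rw [List.drop_eq_getElem_cons hi, hgetI]
        have htw : (L.drop i).takeWhile (· == "W") = "W" :: (L.drop (i + 1)).takeWhile (· == "W") := by
          rw [hdropi, List.takeWhile_cons_of_pos (by simp)]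
        have htlen : ((L.drop (i + 1)).takeWhile (· == "W")).length ≤ L.length - (i + 1) := by
          have h1 := List.Sublist.length_le (List.takeWhile_sublist (l := L.drop (i + 1)) (· == "W"))
          simpa using h1
        set tl := ((L.drop (i + 1)).takeWhile (· == "W")).length with htl
        have hj : scanJ L L.length i = i + (tl + 1) := by
          rw [scanJ_eq (L.length - i) L i le_rfl (le_of_lt hi), htw]
          simp [htl]
          try omega
        have hjle : i + (tl + 1) ≤ L.length := by omega
        have hrest : (L.drop i).dropWhile (· == "W") = L.drop (i + (tl + 1)) := by
          rw [dropWhile_eq_drop_len_takeWhile, htw, List.drop_drop]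
          congr 1
        have hrestd : (L.drop (i + 1)).dropWhile (· == "W") = L.drop (i + (tl + 1)) := by
          rw [← hrest, hdropi, List.dropWhile_cons_of_pos (by simp)]
        rw [hj]
        have hleft : (if 1 ≤ i ∧ L.getD (i - 1) "" ≠ "W" then some (L.getD (i - 1) "") else none)
            = (if i = 0 then none else some (L.getD (i - 1) "")) := by
          by_cases h0 : i = 0
          · subst h0; simp
          · rw [if_pos ⟨by omega, hinv (i - 1) (by omega)⟩, if_neg h0]
        rw [hleft]
        by_cases h0 : i = 0
        · rw [if_pos h0]
          dsimp only
          by_cases hjn : i + (tl + 1) < L.length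
          · have hdj : L.drop (i + (tl + 1)) = L[i + (tl + 1)] :: L.drop (i + (tl + 1) + 1) :=
              List.drop_eq_getElem_cons hjn
            have hLj : L[i + (tl + 1)] ≠ "W" :=
              dropWhile_head_ne (L.drop i) _ _ (by rw [hrest, hdj])
            have hgdj : L.getD (i + (tl + 1)) "" = L[i + (tl + 1)] := List.getD_eq_getElem L "" hjn
            rw [if_pos ⟨hjn, by rw [hgdj]; exact hLj⟩, hgdj]
            dsimp only
            have hR : fillS none (L.drop i)
                = L[i + (tl + 1)] :: (List.replicate tl L[i + (tl + 1)]
                    ++ fillS (some L[i + (tl + 1)]) (L.drop (i + (tl + 1)))) := by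
              rw [hdropi, fillS, if_pos rfl]
              try dsimp only
              rw [hrestd, ← htl]
              rw [hdj]
              simp only [List.head?_cons]
            rw [hR, fill_step d ih L i tl (L[i + (tl + 1)]) hd hi hinv hLj hjle]
            rw [List.replicate_succ]
            simp
          · have hdj : L.drop (i + (tl + 1)) = [] := List.drop_eq_nil_of_le (by omega)
            rw [if_neg (by intro hc; exact hjn hc.1)]
            dsimp only
            have hR : fillS none (L.drop i)
                = "C*" :: (List.replicate tl "C*" ++ fillS (some "C*") (L.drop (i + (tl + 1)))) := by
              rw [hdropi, fillS, if_pos rfl]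
              try dsimp only
              rw [hrestd, ← htl, hdj]
              simp only [List.head?_nil]
            rw [hR, fill_step d ih L i tl "C*" hd hi hinv (by decide) hjle]
            rw [List.replicate_succ]
            simp
        · rw [if_neg h0]
          dsimp only
          have hfne : L.getD (i - 1) "" ≠ "W" := hinv (i - 1) (by omega)
          have hR : fillS (some (L.getD (i - 1) "")) (L.drop i)
              = L.getD (i - 1) "" :: (List.replicate tl (L.getD (i - 1) "")
                  ++ fillS (some (L.getD (i - 1) "")) (L.drop (i + (tl + 1)))) := by
            rw [hdropi, fillS, if_pos rfl]
            rw [hrestd, ← htl]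
          rw [hR, fill_step d ih L i tl (L.getD (i - 1) "") hd hi hinv hfne hjle]
          rw [List.replicate_succ]
          simp
    · rw [dif_neg hi]
      have h' : i = L.length := by omega
      rw [h', List.drop_length, List.take_length]
      simp [fillS]

theorem fillLoop_zero (L : List String) : fillLoop L L.length 0 = fillS none L := by
  rw [fillLoop_eq_fillS_aux L.length L 0 (by omega) (by omega) (by intro k hk; omega)]
  simp


theorem fwd_allW (ms : List String) (h : ∀ x ∈ ms, x = "W") :
    fwdSweep none ms = List.replicate ms.length "W" := by
  induction ms with
  | nil => rfl
  | cons m ms ih =>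
    have hm : m = "W" := h m (by simp)
    rw [fwdSweep, if_neg (by simp [hm]), ih (fun x hx => h x (by simp [hx]))]
    simp [hm, List.replicate_succ]

theorem bwd_none_repW (k : Nat) :
    bwdCore none (List.replicate k "W") = List.replicate k "C*" := by
  induction k with
  | zero => rfl
  | succ k ih => rw [List.replicate_succ, bwdCore, if_neg (by simp), ih]; rfl

theorem bwd_some_repW (k : Nat) (v : String) :
    bwdCore (some v) (List.replicate k "W") = List.replicate k v := by
  induction k with
  | zero => rfl
  | succ k ih => rw [List.replicate_succ, bwdCore, if_neg (by simp), ih]; rfl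

theorem fwd_some_nonW (ms : List String) : ∀ (l : String), l ≠ "W" →
    ∀ x ∈ fwdSweep (some l) ms, x ≠ "W" := by
  induction ms with
  | nil => intro l _ x hx; simp [fwdSweep] at hx
  | cons m ms ih =>
    intro l hl x hx
    by_cases hm : m = "W"
    · rw [fwdSweep, if_neg (by simp [hm])] at hx
      rcases List.mem_cons.mp hx with h | h
      · simpa [h] using hl
      · exact ih l hl x h
    · rw [fwdSweep, if_pos hm] at hx
      rcases List.mem_cons.mp hx with h | h
      · simpa [h] using hm
      · exact ih m hm x h

theorem fwd_some_Wpre (t : List String) : ∀ (l : String) (rest : List String),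
    (∀ x ∈ t, x = "W") →
    fwdSweep (some l) (t ++ rest) = List.replicate t.length l ++ fwdSweep (some l) rest := by
  induction t with
  | nil => intro l rest _; rfl
  | cons m t ih =>
    intro l rest h
    have hm : m = "W" := h m (by simp)
    rw [List.cons_append, fwdSweep, if_neg (by simp [hm]), ih l rest (fun x hx => h x (by simp [hx]))]
    simp [List.replicate_succ]

theorem fwd_none_Wpre (t : List String) : ∀ (rest : List String),
    (∀ x ∈ t, x = "W") →
    fwdSweep none (t ++ rest) = List.replicate t.length "W" ++ fwdSweep none rest := by
  induction t with
  | nil => intro rest _; rfl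
  | cons m t ih =>
    intro rest h
    have hm : m = "W" := h m (by simp)
    rw [List.cons_append, fwdSweep, if_neg (by simp [hm]), ih rest (fun x hx => h x (by simp [hx]))]
    simp [hm, List.replicate_succ]

theorem bwd_nonW_append (ys : List String) : ∀ (nxt : Option String) (zs : List String),
    (∀ y ∈ ys, y ≠ "W") →
    bwdCore nxt (ys ++ zs) = ys ++ bwdCore (ys.getLast?.or nxt) zs := by
  induction ys with
  | nil => intro nxt zs _; rfl
  | cons y ys ih =>
    intro nxt zs h
    have hy : y ≠ "W" := h y (by simp)
    rw [List.cons_append, bwdCore, if_pos hy, ih (some y) zs (fun x hx => h x (by simp [hx])),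
      getLast?_or_cons, List.cons_append]

theorem mem_takeWhile_W {ms : List String} : ∀ x ∈ ms.takeWhile (· == "W"), x = "W" := by
  intro x hx
  have := List.mem_takeWhile_imp hx
  simpa using this

theorem fillS_some_eq_fwd_aux (n : Nat) : ∀ (ms : List String), ms.length ≤ n →
    ∀ (l : String), l ≠ "W" → fillS (some l) ms = fwdSweep (some l) ms := by
  induction n with
  | zero =>
    intro ms hms l _
    have : ms = [] := List.eq_nil_of_length_eq_zero (by omega)
    subst this; simp [fillS, fwdSweep]
  | succ n ih =>
    intro ms hms l hl
    cases ms with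
    | nil => simp [fillS, fwdSweep]
    | cons m ms =>
      by_cases hm : m = "W"
      · rw [fillS, if_pos hm]
        dsimp only
        rw [fwdSweep, if_neg (by simp [hm])]
        have hsplit : ms = ms.takeWhile (· == "W") ++ ms.dropWhile (· == "W") :=
          (List.takeWhile_append_dropWhile).symm
        have hrec : fillS (some l) (ms.dropWhile (· == "W")) = fwdSweep (some l) (ms.dropWhile (· == "W")) := by
          refine ih _ ?_ l hl
          have := List.length_dropWhile_le (p := (· == "W")) (l := ms)
          simp at hms; omega
        have key : fwdSweep (some l) ms
            = List.replicate (ms.takeWhile (· == "W")).length l ++ fwdSweep (some l) (ms.dropWhile (· == "W")) := by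
          conv_lhs => rw [hsplit]
          exact fwd_some_Wpre _ l _ mem_takeWhile_W
        rw [key, ← hrec]
        simp
      · rw [fillS, if_neg hm, fwdSweep, if_pos hm, ih ms (by simpa using hms) m hm]

theorem tw_dw_split (a : List String) : ∀ (r : String) (rs : List String),
    (∀ x ∈ a, x = "W") → r ≠ "W" →
    (a ++ r :: rs).takeWhile (· == "W") = a ∧ (a ++ r :: rs).dropWhile (· == "W") = r :: rs := by
  induction a with
  | nil =>
    intro r rs _ hr
    constructor
    · rw [List.nil_append, List.takeWhile_cons_of_neg (by simp [hr])]
    · rw [List.nil_append, List.dropWhile_cons_of_neg (by simp [hr])]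
  | cons m a ih =>
    intro r rs h hr
    have hm : m = "W" := h m (by simp)
    obtain ⟨h1, h2⟩ := ih r rs (fun x hx => h x (by simp [hx])) hr
    constructor
    · rw [List.cons_append, List.takeWhile_cons_of_pos (by simp [hm]), h1]
    · rw [List.cons_append, List.dropWhile_cons_of_pos (by simp [hm]), h2]

theorem fillS_allW (ms : List String) (h : ∀ x ∈ ms, x = "W") :
    fillS none ms = List.replicate ms.length "C*" := by
  cases ms with
  | nil => simp [fillS]
  | cons m ms =>
    have hm : m = "W" := h m (by simp)
    rw [fillS, if_pos hm]
    dsimp only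
    have h1 : ms.dropWhile (· == "W") = [] :=
      List.dropWhile_eq_nil_iff.mpr (fun x hx => by simp [h x (by simp [hx])])
    have h2 : ms.takeWhile (· == "W") = ms :=
      List.takeWhile_eq_self_iff.mpr (fun x hx => by simp [h x (by simp [hx])])
    rw [h1, h2]
    simp [fillS, List.replicate_succ]

theorem fillS_none_pre (pre : List String) (r : String) (rs : List String)
    (hpre : ∀ x ∈ pre, x = "W") (hr : r ≠ "W") :
    fillS none (pre ++ r :: rs) = List.replicate pre.length r ++ (r :: fillS (some r) rs) := by
  cases pre with
  | nil => rw [List.nil_append, fillS, if_neg hr]; simp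
  | cons p pre' =>
    have hp : p = "W" := hpre p (by simp)
    rw [List.cons_append, fillS, if_pos hp]
    dsimp only
    obtain ⟨htw, hdw⟩ := tw_dw_split pre' r rs (fun x hx => hpre x (by simp [hx])) hr
    rw [htw, hdw]
    have hfs : fillS (some r) (r :: rs) = r :: fillS (some r) rs := by
      rw [fillS, if_neg hr]
    simp [hfs, List.replicate_succ]

theorem fillS_none_eq_sweeps (ms : List String) :
    fillS none ms = (bwdCore none (fwdSweep none ms).reverse).reverse := by
  cases hdw : ms.dropWhile (· == "W") with
  | nil =>
    have hall : ∀ x ∈ ms, x = "W" := by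
      intro x hx
      rw [← List.takeWhile_append_dropWhile (p := (· == "W")) (l := ms), hdw,
        List.append_nil] at hx
      exact mem_takeWhile_W x hx
    rw [fillS_allW ms hall, fwd_allW ms hall, List.reverse_replicate, bwd_none_repW,
      List.reverse_replicate]
  | cons r rs =>
    have hr : r ≠ "W" := dropWhile_head_ne ms r rs hdw
    have hsplit : ms = ms.takeWhile (· == "W") ++ r :: rs := by
      conv_lhs => rw [← List.takeWhile_append_dropWhile (p := (· == "W")) (l := ms)]
      rw [hdw]
    have htlW : ∀ x ∈ fwdSweep (some r) rs, x ≠ "W" := fwd_some_nonW rs r hr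
    have hfwd : fwdSweep none ms
        = List.replicate (ms.takeWhile (· == "W")).length "W" ++ (r :: fwdSweep (some r) rs) := by
      conv_lhs => rw [hsplit]
      rw [fwd_none_Wpre _ _ mem_takeWhile_W, fwdSweep, if_pos hr]
    have hlhs : fillS none ms
        = List.replicate (ms.takeWhile (· == "W")).length r ++ (r :: fwdSweep (some r) rs) := by
      conv_lhs => rw [hsplit]
      rw [fillS_none_pre _ _ _ mem_takeWhile_W hr,
        fillS_some_eq_fwd_aux rs.length rs le_rfl r hr]
    rw [hlhs, hfwd, List.reverse_append, List.reverse_replicate,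
      bwd_nonW_append _ none _ (by
        intro y hy
        rw [List.mem_reverse] at hy
        rcases List.mem_cons.mp hy with h | h
        · rw [h]; exact hr
        · exact htlW y h)]
    rw [List.getLast?_reverse]
    simp only [List.head?_cons, Option.some_or]
    rw [bwd_some_repW, List.reverse_append, List.reverse_replicate, List.reverse_reverse]

theorem colorStepAlt_eq_colorStep : colorStepAlt = colorStep := by
  funext cmap wc d acc asn
  rw [colorStepAlt, colorStep]
  cases hg : pyDictGet? d asn with
  | none => rfl
  | some nid =>
    cases hc : cmap.get? nid with
    | none => rfl
    | some ci => rfl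

theorem colors_eq (as_path : List Int) (as_to_node : List (Int × Int)) (blocks : List (List Int)) :
    colors_for_path as_path as_to_node blocks = colors_for_path_alt as_path as_to_node blocks := by
  unfold colors_for_path colors_for_path_alt
  rw [colorStepAlt_eq_colorStep]
  dsimp only
  rw [fillLoop_zero, fillS_none_eq_sweeps, segfold_eq, chg_none_eq]
  dsimp only
  split_ifs <;> simp_all

-- ===== VERDICT (by name: the statement is the Claim_ definition above) =====
theorem colors_for_path_spec : Claim_equal_colors_for_path := by
  intro as_path as_to_node blocks _
  unfold Spec_colors_for_path
  exact colors_eq as_path as_to_node blocks
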